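-- pv_equiv track=rewrite | github.com/pypi-data/pypi-mirror-352 | packages/AiSummary/AiSummary-1.0.8.tar.gz/AiSummary-1.0.8/AiSummary/core.py | _chunk_text_by_chars
-- ===== SOURCE A (Python) =====
-- def _chunk_text_by_chars(text: str, max_chars: int) -> list[str]:
--     """
--     Break text into chunks of max_chars، ensuring splits happen at spaces.
--     """
--     chunks = []
--     start = 0
--     length = len(text)
--     while start < length:
--         end = min(start + max_chars, length)
--         if end < length:
--             last_space = text.rfind(" ", start, end)
--             if last_space > start:
--                 end = last_space
--         chunks.append(text[start:end])
--         start = end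
--     return chunks
-- ===== SOURCE B (Python) =====
-- def _chunk_text_by_chars(text: str, max_chars: int) -> list[str]:
--     # Pre-index every space position once, then binary-search the index per
--     # chunk instead of re-scanning each window with rfind.
--     spaces = [i for i, c in enumerate(text) if c == " "]
--     n = len(text)
--     chunks = []
--     start = 0
--     while start < n:
--         end = min(start + max_chars, n)
--         if end < n:
--             lo, hi = 0, len(spaces)
--             while lo < hi:
--                 mid = (lo + hi) // 2
--                 if spaces[mid] < end:
--                     lo = mid + 1
--                 else:
--                     hi = mid
--             if lo > 0 and spaces[lo - 1] > start:
--                 end = spaces[lo - 1]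
--         chunks.append(text[start:end])
--         start = end
--     return chunks
-- ===== Notes on version B (the rewrite author's own statement) =====
-- stated objective: alternative
-- what changed: B builds a sorted index of all space positions in one pass and finds each chunk's split point by binary search over that index, instead of A's per-window backward rfind scan.
import Mathlib
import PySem

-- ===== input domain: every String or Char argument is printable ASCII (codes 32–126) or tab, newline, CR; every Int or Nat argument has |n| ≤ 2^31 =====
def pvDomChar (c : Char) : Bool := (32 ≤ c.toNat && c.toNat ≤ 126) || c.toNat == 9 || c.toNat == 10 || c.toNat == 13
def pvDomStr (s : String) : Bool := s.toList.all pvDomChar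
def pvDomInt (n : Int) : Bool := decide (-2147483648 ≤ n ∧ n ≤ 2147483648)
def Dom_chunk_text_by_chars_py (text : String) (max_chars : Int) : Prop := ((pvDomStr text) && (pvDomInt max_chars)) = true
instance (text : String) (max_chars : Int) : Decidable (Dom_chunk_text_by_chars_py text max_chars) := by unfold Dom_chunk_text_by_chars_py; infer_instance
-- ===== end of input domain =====

-- B replaces A's per-window backward rfind scan by a space-position index built once
-- plus a hand-written binary search per chunk (objective: alternative; return value only).

-- ===== PORT A =====
-- while loop of A, fueled (each iteration advances start by ≥ 1 whenever max_chars ≥ 1,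
-- so fuel = len(text) + 1 suffices on Pre_)
def chunkALoop (text : String) (max_chars : Int) (length : Int) (fuel : Nat)
    (start : Int) (chunks : List String) : List String :=
  match fuel with
  | 0 => chunks.reverse
  | fuel + 1 =>
    if start < length then
      let end0 := min (start + max_chars) length
      let end1 :=
        if end0 < length then
          let last_space := PySem.Str.rfindFrom text " " start (some end0)
          if last_space > start then last_space else end0
        else end0
      chunkALoop text max_chars length fuel end1
        (PySem.Str.slice text (some start) (some end1) :: chunks)
    else chunks.reverse

def chunk_text_by_chars_py (text : String) (max_chars : Int) : List String :=
  chunkALoop text max_chars (PySem.Str.len text) (text.toList.length + 1) 0 []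

-- ===== PORT B =====
-- hand-written binary search of Source B (lo/hi halving); exact: mid is always < hi ≤ spaces.length,
-- so the getD default is never read
def bsearchLoop (spaces : List Int) (e : Int) (fuel : Nat) (lo hi : Nat) : Nat :=
  match fuel with
  | 0 => lo
  | fuel + 1 =>
    if lo < hi then
      let mid := (lo + hi) / 2
      if spaces.getD mid 0 < e then bsearchLoop spaces e fuel (mid + 1) hi
      else bsearchLoop spaces e fuel lo mid
    else lo

def chunkBLoop (text : String) (max_chars : Int) (spaces : List Int) (n : Int) (fuel : Nat)
    (start : Int) (chunks : List String) : List String :=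
  match fuel with
  | 0 => chunks.reverse
  | fuel + 1 =>
    if start < n then
      let end0 := min (start + max_chars) n
      let end1 :=
        if end0 < n then
          let lo := bsearchLoop spaces end0 (spaces.length + 1) 0 spaces.length
          if decide (0 < lo) && decide (spaces.getD (lo - 1) 0 > start) then
            spaces.getD (lo - 1) 0
          else end0
        else end0
      chunkBLoop text max_chars spaces n fuel end1
        (PySem.Str.slice text (some start) (some end1) :: chunks)
    else chunks.reverse

def chunk_text_by_chars_py_alt (text : String) (max_chars : Int) : List String :=
  let spaces := ((PySem.List.enumerate text.toList 0).filter (fun p => p.2 == ' ')).map (fun p => p.1)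
  chunkBLoop text max_chars spaces (PySem.Str.len text) (text.toList.length + 1) 0 []

-- ===== PRECONDITION & SPEC =====
-- Pre_ excludes max_chars ≤ 0 with nonempty text: there A's while loop never terminates
-- (end never moves past start), so A returns no value at all.
def Pre_chunk_text_by_chars_py (text : String) (max_chars : Int) : Prop :=
  1 ≤ max_chars ∨ text = ""
instance (text : String) (max_chars : Int) : Decidable (Pre_chunk_text_by_chars_py text max_chars) := by
  unfold Pre_chunk_text_by_chars_py; infer_instance

def pvWitness_chunk_text_by_chars_py : String × Int := ("hello world, ok", 6)

def Spec_chunk_text_by_chars_py (text : String) (max_chars : Int) (out : List String) : Prop :=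
  out = chunk_text_by_chars_py_alt text max_chars
instance (text : String) (max_chars : Int) (out : List String) : Decidable (Spec_chunk_text_by_chars_py text max_chars out) := by
  unfold Spec_chunk_text_by_chars_py; infer_instance

-- ===== CLAIM (what is proved, stated in full; the proofs are below) =====
def Claim_equal_chunk_text_by_chars_py : Prop := ∀ (text : String) (max_chars : Int), Dom_chunk_text_by_chars_py text max_chars → Pre_chunk_text_by_chars_py text max_chars → Spec_chunk_text_by_chars_py text max_chars (chunk_text_by_chars_py text max_chars)

-- ===== LEMMAS AND PROOFS =====
theorem le_getLast_of_sorted (l : List Nat) (h : l.Pairwise (· < ·)) (x : Nat) (hx : x ∈ l)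
    (hne : l ≠ []) : x ≤ l.getLast hne := by
  obtain ⟨i, hi, rfl⟩ := List.mem_iff_getElem.mp hx
  rw [List.getLast_eq_getElem]
  rcases Nat.lt_or_ge i (l.length - 1) with hlt | hge
  · exact le_of_lt ((List.pairwise_iff_getElem.mp h) i (l.length - 1) hi (by omega) hlt)
  · have : i = l.length - 1 := by omega
    subst this; exact le_refl _

theorem filter_range_getLast?_some (t : Nat) (P : Nat → Bool) (m : Nat) :
    ((List.range t).filter P).getLast? = some m ↔
      (m < t ∧ P m = true ∧ ∀ j, j < t → P j = true → j ≤ m) := by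
  have hsort : ((List.range t).filter P).Pairwise (· < ·) :=
    (List.pairwise_lt_range).filter _
  constructor
  · intro h
    have hne : (List.range t).filter P ≠ [] := by
      intro he; rw [he] at h; simp at h
    have hlast := List.getLast?_eq_some_getLast (l := (List.range t).filter P) hne
    rw [hlast] at h
    have hmeq : ((List.range t).filter P).getLast hne = m := Option.some_inj.mp h
    have hm : m ∈ (List.range t).filter P := hmeq ▸ List.getLast_mem hne
    have hm' := List.mem_filter.mp hm
    refine ⟨List.mem_range.mp hm'.1, hm'.2, ?_⟩
    intro j hj hPj
    have hjm : j ∈ (List.range t).filter P :=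
      List.mem_filter.mpr ⟨List.mem_range.mpr hj, hPj⟩
    have := le_getLast_of_sorted _ hsort j hjm hne
    omega
  · rintro ⟨hmt, hPm, hmax⟩
    have hm : m ∈ (List.range t).filter P :=
      List.mem_filter.mpr ⟨List.mem_range.mpr hmt, hPm⟩
    have hne : (List.range t).filter P ≠ [] := List.ne_nil_of_mem hm
    rw [List.getLast?_eq_some_getLast hne]
    congr 1
    have h1 := le_getLast_of_sorted _ hsort m hm hne
    have hg := List.getLast_mem hne
    have hg' := List.mem_filter.mp hg
    have h2 := hmax _ (List.mem_range.mp hg'.1) hg'.2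
    omega

theorem filter_range_getLast?_none (t : Nat) (P : Nat → Bool) :
    ((List.range t).filter P).getLast? = none ↔ ∀ j, j < t → ¬ P j = true := by
  rw [List.getLast?_eq_none_iff]
  constructor
  · intro h j hj hPj
    have : j ∈ (List.range t).filter P := List.mem_filter.mpr ⟨List.mem_range.mpr hj, hPj⟩
    rw [h] at this; simp at this
  · intro h
    apply List.eq_nil_iff_forall_not_mem.mpr
    intro j hj
    have := List.mem_filter.mp hj
    exact h j (List.mem_range.mp this.1) this.2

theorem isPrefixOf_space (w : List Char) : ([' '].isPrefixOf w) = (w[0]? == some ' ') := by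
  cases w with
  | nil => simp [List.isPrefixOf]
  | cons a l =>
    simp only [List.isPrefixOf, List.getElem?_cons_zero]
    rcases eq_or_ne a ' ' with rfl | h
    · simp
    · have h1 : (' ' == a) = false := by simp [beq_eq_false_iff_ne]; exact fun hh => h hh.symm
      have h2 : (some a == some ' ') = false := by simp [beq_eq_false_iff_ne]; exact h
      simp [h1, h2]

theorem rfind_go_space (w : List Char) (k : Nat) :
    PySem.Chars.rfind.go w [' '] k =
      match ((List.range (k + 1)).filter (fun j => w[j]? == some ' ')).getLast? with
      | none => -1
      | some j => (j : Int) := by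
  induction k with
  | zero =>
    simp only [PySem.Chars.rfind.go]
    rw [isPrefixOf_space]
    cases h : (w[0]? == some ' ') <;> simp [h]
  | succ k ih =>
    rw [show PySem.Chars.rfind.go w [' '] (k+1) =
      (if [' '].isPrefixOf (List.drop (k+1) w) then ((k+1 : Nat) : Int) else PySem.Chars.rfind.go w [' '] k) from rfl]
    rw [List.range_succ, List.filter_append]
    have hdrop : ([' '].isPrefixOf (List.drop (k+1) w)) = (w[k+1]? == some ' ') := by
      rw [isPrefixOf_space]
      simp [List.getElem?_drop]
    rw [hdrop]
    cases h : (w[k+1]? == some ' ') with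
    | true => simp [h]
    | false => simp [h, ih]

theorem rfind_space (w : List Char) :
    PySem.Chars.rfind w [' '] =
      match ((List.range w.length).filter (fun j => w[j]? == some ' ')).getLast? with
      | none => -1
      | some j => (j : Int) := by
  rw [show PySem.Chars.rfind w [' '] = PySem.Chars.rfind.go w [' '] w.length from rfl,
     rfind_go_space]
  have : (List.range (w.length + 1)).filter (fun j => w[j]? == some ' ') =
      (List.range w.length).filter (fun j => w[j]? == some ' ') := by
    rw [List.range_succ, List.filter_append]
    simp
  rw [this]

def mslC (cs : List Char) (t : Nat) : Option Nat :=
  ((List.range t).filter (fun j => cs[j]? == some ' ')).getLast?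

theorem rfindFrom_window (cs : List Char) (s t : Nat) (hst : s < t) (htn : t ≤ cs.length) :
    PySem.Chars.rfindFrom cs [' '] (s : Int) (some (t : Int)) =
      match mslC cs t with
      | some m => if s ≤ m then (m : Int) else -1
      | none => -1 := by
  unfold PySem.Chars.rfindFrom
  have h1 : ¬ ((cs.length : Int) < (t : Int)) := by exact_mod_cast not_lt.mpr htn
  have h2 : ¬ ((t : Int) < 0) := by omega
  have h3 : ¬ ((s : Int) < 0) := by omega
  have h4 : ¬ ((t : Int) < (s : Int)) := by omega
  simp only [if_neg h1, if_neg h2, if_neg h3, if_neg h4, rfind_space, Int.toNat_natCast]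
  have hwin : ((List.range ((cs.take t).drop s).length).filter
        (fun j => ((cs.take t).drop s)[j]? == some ' ')).getLast? =
      match mslC cs t with
      | some m => if s ≤ m then some (m - s) else none
      | none => none := by
    have hlen : ((cs.take t).drop s).length = t - s := by
      simp [List.length_drop, List.length_take]; omega
    have hget : ∀ j : Nat, j < t - s → ((cs.take t).drop s)[j]? = cs[s + j]? := by
      intro j hj
      rw [List.getElem?_drop, List.getElem?_take_of_lt (by omega)]
    rcases hm : mslC cs t with _ | m
    · unfold mslC at hm
      rw [filter_range_getLast?_none] at hm
      show _ = (none : Option Nat)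
      rw [filter_range_getLast?_none]
      intro j hj
      rw [hlen] at hj
      rw [hget j hj]
      exact hm (s + j) (by omega)
    · unfold mslC at hm
      rw [filter_range_getLast?_some] at hm
      show _ = if s ≤ m then some (m - s) else none
      obtain ⟨hmt, hPm, hmax⟩ := hm
      by_cases hsm : s ≤ m
      · simp only [if_pos hsm]
        rw [filter_range_getLast?_some, hlen]
        refine ⟨by omega, ?_, ?_⟩
        · rw [hget (m - s) (by omega), show s + (m - s) = m by omega]; exact hPm
        · intro j hj hPj
          rw [hget j hj] at hPj
          have := hmax (s + j) (by omega) hPj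
          omega
      · simp only [if_neg hsm]
        rw [filter_range_getLast?_none]
        intro j hj hPj
        rw [hlen] at hj
        rw [hget j hj] at hPj
        have := hmax (s + j) (by omega) hPj
        omega
  rw [hwin]
  rcases mslC cs t with _ | m
  · norm_num
  · by_cases hsm : s ≤ m
    · simp only [if_pos hsm]
      have : ¬ ((m - s : Nat) : Int) = -1 := by omega
      rw [if_neg this]
      push_cast [Nat.cast_sub hsm]
      ring
    · simp only [if_neg hsm]
      norm_num

theorem spaces_mem (cs : List Char) (x : Int) :
    x ∈ ((PySem.List.enumerate cs 0).filter (fun p => p.2 == ' ')).map (fun p => p.1) ↔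
      ∃ j : Nat, cs[j]? = some ' ' ∧ x = (j : Int) := by
  simp only [List.mem_map, List.mem_filter, PySem.List.mem_enumerate_iff]
  constructor
  · rintro ⟨p, ⟨⟨k, hk, rfl⟩, hsp⟩, rfl⟩
    refine ⟨k, ?_, by simp⟩
    rw [List.getElem?_eq_getElem hk]
    simp only [beq_iff_eq] at hsp
    simp [hsp]
  · rintro ⟨j, hj, rfl⟩
    obtain ⟨hlt, hv⟩ := List.getElem?_eq_some_iff.mp hj
    exact ⟨((j : Int), ' '), ⟨⟨j, hlt, by simp [hv]⟩, by simp⟩, by simp⟩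

theorem spaces_sorted (cs : List Char) :
    (((PySem.List.enumerate cs 0).filter (fun p => p.2 == ' ')).map (fun p => p.1)).Pairwise (· < ·) := by
  rw [List.pairwise_map]
  exact (PySem.List.pairwise_lt_enumerate cs 0).filter _

theorem sorted_mono (spaces : List Int) (hs : spaces.Pairwise (· < ·)) (i j : Nat)
    (hij : i ≤ j) (hj : j < spaces.length) : spaces[i]'(by omega) ≤ spaces[j] := by
  rcases Nat.lt_or_ge i j with h | h
  · exact le_of_lt ((List.pairwise_iff_getElem.mp hs) i j (by omega) hj h)
  · have : i = j := by omega
    subst this; exact le_refl _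

theorem bsearch_inv (spaces : List Int) (hs : spaces.Pairwise (· < ·)) (e : Int) :
    ∀ (d lo hi : Nat), hi - lo ≤ d → hi ≤ spaces.length →
      (∀ i, ∀ _ : i < spaces.length, i < lo → spaces[i] < e) →
      (∀ i, ∀ _ : i < spaces.length, hi ≤ i → ¬ spaces[i] < e) →
      bsearchLoop spaces e d lo hi ≤ max lo hi ∧
      (∀ i, ∀ _ : i < spaces.length, i < bsearchLoop spaces e d lo hi → spaces[i] < e) ∧
      (∀ i, ∀ _ : i < spaces.length, bsearchLoop spaces e d lo hi ≤ i → ¬ spaces[i] < e) := by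
  intro d
  induction d with
  | zero =>
    intro lo hi hd hhi hlo hhi'
    rw [bsearchLoop]
    exact ⟨by omega, fun i hi' hil => hlo i hi' hil,
      fun i hi' hli => hhi' i hi' (by omega)⟩
  | succ d ih =>
    intro lo hi hd hhi hlo hhi'
    by_cases h : lo < hi
    · rw [bsearchLoop, if_pos h]
      have hmid1 : lo ≤ (lo + hi) / 2 := by omega
      have hmid2 : (lo + hi) / 2 < hi := by omega
      have hmidlen : (lo + hi) / 2 < spaces.length := by omega
      simp only []
      by_cases hc : spaces.getD ((lo + hi) / 2) 0 < e
      · rw [if_pos hc]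
        rw [List.getD_eq_getElem spaces 0 hmidlen] at hc
        have res := ih ((lo + hi) / 2 + 1) hi (by omega) hhi
          (fun i hi' hil => by
            have : spaces[i] ≤ spaces[(lo + hi) / 2]'hmidlen :=
              sorted_mono spaces hs i ((lo + hi) / 2) (by omega) hmidlen
            omega)
          hhi'
        exact ⟨by omega, res.2.1, res.2.2⟩
      · rw [if_neg hc]
        rw [List.getD_eq_getElem spaces 0 hmidlen] at hc
        have res := ih lo ((lo + hi) / 2) (by omega) (by omega) hlo
          (fun i hi' hil => by
            have : spaces[(lo + hi) / 2]'hmidlen ≤ spaces[i] :=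
              sorted_mono spaces hs ((lo + hi) / 2) i (by omega) hi'
            omega)
        exact ⟨by omega, res.2.1, res.2.2⟩
    · rw [bsearchLoop, if_neg h]
      exact ⟨by omega, fun i hi' hil => hlo i hi' hil,
        fun i hi' hli => hhi' i hi' (by omega)⟩

theorem endA_eq (cs : List Char) (s t : Nat) (hst : s < t) (htn : t ≤ cs.length) (X : Int) :
    (let ls := PySem.Chars.rfindFrom cs [' '] (s : Int) (some (t : Int));
     if ls > (s : Int) then ls else X) =
      match mslC cs t with
      | some m => if s < m then (m : Int) else X
      | none => X := by
  simp only [rfindFrom_window cs s t hst htn]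
  rcases mslC cs t with _ | m
  · show (if (-1 : Int) > (s : Int) then (-1 : Int) else X) = X
    rw [if_neg (by omega)]
  · show (if (if s ≤ m then ((m : Nat) : Int) else -1) > (s : Int)
        then (if s ≤ m then ((m : Nat) : Int) else -1) else X) =
      if s < m then ((m : Nat) : Int) else X
    split_ifs <;> first | rfl | omega

theorem endB_eq (cs : List Char) (s t : Nat) (_hst : s < t) (_htn : t ≤ cs.length) (X : Int)
    (spaces : List Int) (lo : Nat)
    (hspdef : spaces = ((PySem.List.enumerate cs 0).filter (fun p => p.2 == ' ')).map (fun p => p.1))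
    (hlodef : lo = bsearchLoop spaces (t : Int) (spaces.length + 1) 0 spaces.length) :
    (if decide (0 < lo) && decide (spaces.getD (lo - 1) 0 > (s : Int)) then
       spaces.getD (lo - 1) 0
     else X) =
      match mslC cs t with
      | some m => if s < m then (m : Int) else X
      | none => X := by
  have hmemiff : ∀ x : Int, x ∈ spaces ↔ ∃ j : Nat, cs[j]? = some ' ' ∧ x = (j : Int) :=
    fun x => by rw [hspdef]; exact spaces_mem cs x
  have hs : spaces.Pairwise (· < ·) := by rw [hspdef]; exact spaces_sorted cs
  obtain ⟨hrle, hlt, hge⟩ := bsearch_inv spaces hs (t : Int) (spaces.length + 1) 0 spaces.length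
    (by omega) (le_refl _) (by omega) (fun i hi' hli => by omega)
  rw [← hlodef] at hrle hlt hge
  have hlole : lo ≤ spaces.length := by omega
  rcases hm : mslC cs t with _ | m
  · unfold mslC at hm
    rw [filter_range_getLast?_none] at hm
    have hlo0 : lo = 0 := by
      by_contra hne
      have h0len : 0 < spaces.length := by omega
      have := hlt 0 h0len (by omega)
      obtain ⟨j, hj, hje⟩ := (hmemiff spaces[0]).mp (List.getElem_mem _)
      have hjlt : j < t := by omega
      exact hm j hjlt (by simp [hj])
    show (if decide (0 < lo) && decide (spaces.getD (lo - 1) 0 > (s : Int)) then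
       spaces.getD (lo - 1) 0 else X) = X
    rw [hlo0]
    simp
  · unfold mslC at hm
    rw [filter_range_getLast?_some] at hm
    obtain ⟨hmt, hPm, hmax⟩ := hm
    simp only [beq_iff_eq] at hPm
    have hmmem : ((m : Nat) : Int) ∈ spaces := (hmemiff _).mpr ⟨m, hPm, rfl⟩
    obtain ⟨im, him, hime⟩ := List.mem_iff_getElem.mp hmmem
    have himlo : im < lo := by
      by_contra hc
      exact (hge im him (by omega)) (by rw [hime]; exact_mod_cast hmt)
    have hlo0 : 0 < lo := by omega
    have hl1len : lo - 1 < spaces.length := by omega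
    have hgd : spaces.getD (lo - 1) 0 = spaces[lo - 1] := List.getD_eq_getElem spaces 0 hl1len
    have hval : spaces[lo - 1] = (m : Int) := by
      have h1 : spaces[lo - 1] < (t : Int) := hlt (lo - 1) hl1len (by omega)
      obtain ⟨j, hj, hje⟩ := (hmemiff spaces[lo - 1]).mp (List.getElem_mem _)
      have hjm : j ≤ m := hmax j (by omega) (by simp [hj])
      have h2 : ((m : Nat) : Int) ≤ spaces[lo - 1] := by
        rw [← hime]; exact sorted_mono spaces hs im (lo - 1) (by omega) hl1len
      omega
    show (if decide (0 < lo) && decide (spaces.getD (lo - 1) 0 > (s : Int)) then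
       spaces.getD (lo - 1) 0 else X) = if s < m then ((m : Nat) : Int) else X
    rw [hgd, hval]
    by_cases hsm : s < m
    · rw [if_pos, if_pos hsm]
      simp only [Bool.and_eq_true, decide_eq_true_eq]
      exact ⟨hlo0, by exact_mod_cast hsm⟩
    · rw [if_neg, if_neg hsm]
      simp only [Bool.and_eq_true, decide_eq_true_eq, not_and]
      intro _; omega

theorem end1_ab (text : String) (max_chars : Int) (hmax : 1 ≤ max_chars)
    (start : Int) (h0 : 0 ≤ start) (hlt : start < (text.toList.length : Int)) :
    (let end0 := min (start + max_chars) (text.toList.length : Int)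
     (if end0 < (text.toList.length : Int) then
        (let last_space := PySem.Str.rfindFrom text " " start (some end0)
         if last_space > start then last_space else end0)
      else end0)) =
    (let end0 := min (start + max_chars) (text.toList.length : Int)
     (if end0 < (text.toList.length : Int) then
        (let lo := bsearchLoop (((PySem.List.enumerate text.toList 0).filter (fun p => p.2 == ' ')).map (fun p => p.1)) end0 ((((PySem.List.enumerate text.toList 0).filter (fun p => p.2 == ' ')).map (fun p => p.1)).length + 1) 0 (((PySem.List.enumerate text.toList 0).filter (fun p => p.2 == ' ')).map (fun p => p.1)).length
         if decide (0 < lo) && decide ((((PySem.List.enumerate text.toList 0).filter (fun p => p.2 == ' ')).map (fun p => p.1)).getD (lo - 1) 0 > start) then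
           (((PySem.List.enumerate text.toList 0).filter (fun p => p.2 == ' ')).map (fun p => p.1)).getD (lo - 1) 0
         else end0)
      else end0)) := by
  set cs := text.toList with hcs
  set len := cs.length with hlen
  set end0 := min (start + max_chars) (len : Int) with hend0
  have he1 : start < end0 := by omega
  have he2 : end0 ≤ (len : Int) := by omega
  by_cases he : end0 < (len : Int)
  · rw [if_pos he, if_pos he]
    have hs' : ((start.toNat : Nat) : Int) = start := Int.toNat_of_nonneg h0
    have ht' : ((end0.toNat : Nat) : Int) = end0 := Int.toNat_of_nonneg (by omega)
    have hst : start.toNat < end0.toNat := by omega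
    have htn : end0.toNat ≤ len := by omega
    have hstr : ∀ (a : Int) (b : Option Int), PySem.Str.rfindFrom text " " a b =
        PySem.Chars.rfindFrom cs [' '] a b := by
      intro a b
      rw [PySem.Str.rfindFrom_eq]
      rfl
    have hA := endA_eq cs start.toNat end0.toNat hst htn ((end0.toNat : Nat) : Int)
    have hB := endB_eq cs start.toNat end0.toNat hst htn ((end0.toNat : Nat) : Int)
      (((PySem.List.enumerate cs 0).filter (fun p => p.2 == ' ')).map (fun p => p.1))
      (bsearchLoop (((PySem.List.enumerate cs 0).filter (fun p => p.2 == ' ')).map (fun p => p.1)) ((end0.toNat : Nat) : Int) ((((PySem.List.enumerate cs 0).filter (fun p => p.2 == ' ')).map (fun p => p.1)).length + 1) 0 (((PySem.List.enumerate cs 0).filter (fun p => p.2 == ' ')).map (fun p => p.1)).length)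
      rfl rfl
    simp only [] at hA hB
    rw [hstr, ← hs', ← ht']
    simp only []
    rw [hA, hB]

  · rw [if_neg he, if_neg he]

theorem loops_eq (text : String) (max_chars : Int) (hmax : 1 ≤ max_chars) :
    ∀ (fuel : Nat) (start : Int) (chunks : List String), 0 ≤ start →
      chunkALoop text max_chars (text.toList.length : Int) fuel start chunks =
        chunkBLoop text max_chars
          (((PySem.List.enumerate text.toList 0).filter (fun p => p.2 == ' ')).map (fun p => p.1))
          (text.toList.length : Int) fuel start chunks := by
  intro fuel
  induction fuel with
  | zero => intro start chunks h0; rfl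
  | succ fuel ih =>
    intro start chunks h0
    rw [chunkALoop, chunkBLoop]
    by_cases hlt : start < (text.toList.length : Int)
    · rw [if_pos hlt, if_pos hlt]
      have hE := end1_ab text max_chars hmax start h0 hlt
      simp only [] at hE ⊢
      rw [hE]
      apply ih
      rw [← hE]
      by_cases he : min (start + max_chars) (text.toList.length : Int) < (text.toList.length : Int)
      · rw [if_pos he]
        by_cases hgt : PySem.Str.rfindFrom text " " start
            (some (min (start + max_chars) (text.toList.length : Int))) > start
        · rw [if_pos hgt]; omega
        · rw [if_neg hgt]; omega
      · rw [if_neg he]; omega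
    · rw [if_neg hlt, if_neg hlt]

-- ===== VERDICT (by name: the statement is the Claim_ definition above) =====
theorem chunk_text_by_chars_py_spec : Claim_equal_chunk_text_by_chars_py := by
  intro text max_chars _hdom hpre
  unfold Spec_chunk_text_by_chars_py chunk_text_by_chars_py chunk_text_by_chars_py_alt
  rcases hpre with hmax | hempty
  · have hlen : PySem.Str.len text = (text.toList.length : Int) := by
      simp [PySem.Str.len]
    rw [hlen]
    exact loops_eq text max_chars hmax _ 0 [] le_rfl
  · subst hempty
    simp [chunkALoop, chunkBLoop, PySem.Str.len]
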